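-- pv_equiv track=rewrite | github.com/pypi-data/pypi-mirror-389 | packages/gns3-mcp/gns3_mcp-0.46.4-py3-none-any.whl/gns3_mcp/server/prompts/lab_setup.py | generate_mesh_ips
-- ===== SOURCE A (Python) =====
-- from typing import Dict, List, Tuple
--
-- def generate_mesh_ips(device_count: int) -> Dict[str, Dict[str, str]]:
--     """Generate IP addresses for mesh topology (point-to-point links)
--
--     Args:
--         device_count: Number of devices
--
--     Returns:
--         Dict mapping node names to interface IP configs
--     """
--     ips = {f"R{i}": {} for i in range(1, device_count + 1)}
--
--     subnet = 1
--     interface_counters = {f"R{i}": 0 for i in range(1, device_count + 1)}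
--
--     for i in range(1, device_count + 1):
--         for j in range(i + 1, device_count + 1):
--             # R{i} gets .1, R{j} gets .2 on subnet
--             ips[f"R{i}"][f"Gi0/{interface_counters[f'R{i}']}"] = f"10.0.{subnet}.1/30"
--             ips[f"R{j}"][f"Gi0/{interface_counters[f'R{j}']}"] = f"10.0.{subnet}.2/30"
--
--             interface_counters[f"R{i}"] += 1
--             interface_counters[f"R{j}"] += 1
--             subnet += 1
--
--     return ips
-- ===== SOURCE B (Python) =====
-- def subnet_of_pair(n, a, b):
--     """Lexicographic rank of the pair (a, b), 1 <= a < b <= n."""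
--     return (a - 1) * n - a * (a - 1) // 2 + (b - a)
--
--
-- def router_config(n, r):
--     """Interface -> IP map of router r: lower-numbered partners first
--     (r is the .2 end of the link), then higher-numbered ones (.1 end)."""
--     cfg = {}
--     port = 0
--     for s in range(1, r):
--         cfg["Gi0/{}".format(port)] = "10.0.{}.2/30".format(subnet_of_pair(n, s, r))
--         port += 1
--     for s in range(r + 1, n + 1):
--         cfg["Gi0/{}".format(port)] = "10.0.{}.1/30".format(subnet_of_pair(n, r, s))
--         port += 1
--     return cfg
--
--
-- def generate_mesh_ips(device_count: int):
--     return {"R{}".format(r): router_config(device_count, r)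
--             for r in range(1, device_count + 1)}
-- ===== Notes on version B (the rewrite author's own statement) =====
-- stated objective: alternative
-- what changed: B builds each router's interface config independently in a per-router loop, computing every pair's subnet by a closed-form lexicographic rank, instead of A's per-pair double loop threading a running subnet counter and a dict of per-router interface counters.
import Mathlib
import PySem

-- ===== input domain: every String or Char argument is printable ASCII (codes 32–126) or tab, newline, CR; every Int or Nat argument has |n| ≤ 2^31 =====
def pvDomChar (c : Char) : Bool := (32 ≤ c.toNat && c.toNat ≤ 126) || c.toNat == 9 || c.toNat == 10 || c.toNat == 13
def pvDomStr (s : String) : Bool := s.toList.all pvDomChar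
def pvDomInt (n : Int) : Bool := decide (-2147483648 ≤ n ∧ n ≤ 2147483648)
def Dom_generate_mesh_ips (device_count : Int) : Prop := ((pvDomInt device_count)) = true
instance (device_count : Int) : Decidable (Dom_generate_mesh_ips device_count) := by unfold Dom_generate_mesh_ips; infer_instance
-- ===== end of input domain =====

-- B builds each router's config independently with a closed-form subnet rank instead of A's
-- per-pair double loop with running counters (alternative decomposition, same asymptotic cost).

-- ===== PORT A =====
-- one iteration of A's inner loop body, on state (ips, interface_counters, subnet)
def meshStepA
    (st : PySem.Dict String (PySem.Dict String String) × PySem.Dict String Int × Int)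
    (i j : Int) :
    PySem.Dict String (PySem.Dict String String) × PySem.Dict String Int × Int :=
  let ips := st.1
  let ctr := st.2.1
  let subnet := st.2.2
  -- ips[f"R{i}"][f"Gi0/{counters[f'R{i}']}"] = f"10.0.{subnet}.1/30"  (key always present; modify is exact here)
  let ips := ips.modify ("R" ++ PySem.Int.toStr i) PySem.Dict.empty
      (fun d => d.insert ("Gi0/" ++ PySem.Int.toStr (ctr.getD ("R" ++ PySem.Int.toStr i) 0))
        ("10.0." ++ PySem.Int.toStr subnet ++ ".1/30"))
  -- ips[f"R{j}"][f"Gi0/{counters[f'R{j}']}"] = f"10.0.{subnet}.2/30"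
  let ips := ips.modify ("R" ++ PySem.Int.toStr j) PySem.Dict.empty
      (fun d => d.insert ("Gi0/" ++ PySem.Int.toStr (ctr.getD ("R" ++ PySem.Int.toStr j) 0))
        ("10.0." ++ PySem.Int.toStr subnet ++ ".2/30"))
  -- interface_counters[f"R{i}"] += 1 ; interface_counters[f"R{j}"] += 1
  let ctr := ctr.insert ("R" ++ PySem.Int.toStr i) (ctr.getD ("R" ++ PySem.Int.toStr i) 0 + 1)
  let ctr := ctr.insert ("R" ++ PySem.Int.toStr j) (ctr.getD ("R" ++ PySem.Int.toStr j) 0 + 1)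
  (ips, ctr, subnet + 1)

def generate_mesh_ips (device_count : Int) : List (String × List (String × String)) :=
  let ips0 : PySem.Dict String (PySem.Dict String String) :=
    (PySem.List.pyRange 1 (device_count + 1)).foldl
      (fun d i => d.insert ("R" ++ PySem.Int.toStr i) PySem.Dict.empty) PySem.Dict.empty
  let ctr0 : PySem.Dict String Int :=
    (PySem.List.pyRange 1 (device_count + 1)).foldl
      (fun d i => d.insert ("R" ++ PySem.Int.toStr i) 0) PySem.Dict.empty
  let st :=
    (PySem.List.pyRange 1 (device_count + 1)).foldl
      (fun st i =>
        (PySem.List.pyRange (i + 1) (device_count + 1)).foldl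
          (fun st j => meshStepA st i j) st)
      (ips0, ctr0, (1 : Int))
  st.1.items.map (fun p => (p.1, p.2.items))

-- ===== PORT B =====
-- subnet(a, b) = lexicographic rank of the pair (a, b), a < b
def meshSubnet (n a b : Int) : Int :=
  (a - 1) * n - PySem.Int.floordiv (a * (a - 1)) 2 + (b - a)

-- body of B's first inner loop (lower partner s: r is the .2 end), state (cfg, port)
def meshCfgStep1 (n r : Int) (st : PySem.Dict String String × Int) (s : Int) :
    PySem.Dict String String × Int :=
  (st.1.insert ("Gi0/" ++ PySem.Int.toStr st.2)
    ("10.0." ++ PySem.Int.toStr (meshSubnet n s r) ++ ".2/30"), st.2 + 1)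

-- body of B's second inner loop (higher partner s: r is the .1 end)
def meshCfgStep2 (n r : Int) (st : PySem.Dict String String × Int) (s : Int) :
    PySem.Dict String String × Int :=
  (st.1.insert ("Gi0/" ++ PySem.Int.toStr st.2)
    ("10.0." ++ PySem.Int.toStr (meshSubnet n r s) ++ ".1/30"), st.2 + 1)

def meshCfg (n r : Int) : PySem.Dict String String :=
  let st1 := (PySem.List.pyRange 1 r).foldl (meshCfgStep1 n r) (PySem.Dict.empty, 0)
  let st2 := (PySem.List.pyRange (r + 1) (n + 1)).foldl (meshCfgStep2 n r) st1
  st2.1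

def generate_mesh_ips_alt (device_count : Int) : List (String × List (String × String)) :=
  ((PySem.List.pyRange 1 (device_count + 1)).foldl
      (fun d r => d.insert ("R" ++ PySem.Int.toStr r) (meshCfg device_count r))
      PySem.Dict.empty).items.map (fun p => (p.1, p.2.items))

-- ===== PRECONDITION & SPEC =====
def Spec_generate_mesh_ips (device_count : Int) (out : List (String × List (String × String))) : Prop := out = generate_mesh_ips_alt device_count
instance (device_count : Int) (out : List (String × List (String × String))) : Decidable (Spec_generate_mesh_ips device_count out) := by unfold Spec_generate_mesh_ips; infer_instance

-- ===== CLAIM (what is proved, stated in full; the proofs are below) =====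
def Claim_equal_generate_mesh_ips : Prop := ∀ (device_count : Int), Dom_generate_mesh_ips device_count → Spec_generate_mesh_ips device_count (generate_mesh_ips device_count)

-- ===== LEMMAS AND PROOFS =====

-- the router-name key f"R{i}"
def mKey (i : Int) : String := "R" ++ PySem.Int.toStr i

-- decimal decoder, inverse of Nat.toDigits 10 (used only for key injectivity)
def pvDec (l : List Char) : Nat := l.foldl (fun a c => a * 10 + (c.toNat - 48)) 0

theorem pvDec_toDigits (n : Nat) : pvDec (Nat.toDigits 10 n) = n := by
  induction n using Nat.strong_induction_on with
  | _ n ih =>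
    rw [Nat.toDigits_eq_if (by norm_num)]
    by_cases h : n < 10
    · simp only [if_pos h, pvDec, List.foldl]
      interval_cases n <;> decide
    · simp only [if_neg h]
      have hd : n / 10 < n := Nat.div_lt_self (by omega) (by norm_num)
      have ihd := ih (n / 10) hd
      simp only [pvDec, List.foldl_append, List.foldl] at ihd ⊢
      rw [ihd]
      have hc : (Nat.digitChar (n % 10)).toNat - 48 = n % 10 := by
        have hm : n % 10 < 10 := Nat.mod_lt _ (by norm_num)
        interval_cases h : n % 10 <;> decide
      rw [hc]
      omega


theorem toStr_inj_nonneg {i j : Int} (hi : 0 ≤ i) (hj : 0 ≤ j)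
    (h : PySem.Int.toStr i = PySem.Int.toStr j) : i = j := by
  have h2 : (PySem.Int.toStr i).toList = (PySem.Int.toStr j).toList := by rw [h]
  rw [PySem.Int.toList_toStr, PySem.Int.toList_toStr] at h2
  unfold PySem.Int.toChars at h2
  rw [if_neg (by omega), if_neg (by omega)] at h2
  have := congrArg pvDec h2
  rw [pvDec_toDigits, pvDec_toDigits] at this
  omega


theorem mKey_ne {i j : Int} (hi : 0 ≤ i) (hj : 0 ≤ j) (hne : i ≠ j) : mKey i ≠ mKey j := by
  intro h
  apply hne
  apply toStr_inj_nonneg hi hj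
  have := congrArg String.toList h
  simp only [mKey, String.toList_append] at this
  exact String.toList_inj.mp (List.append_cancel_left this)


-- the flat list of pairs A's double loop runs over, in order
def meshPairs (n : Int) : List (Int × Int) :=
  (PySem.List.pyRange 1 (n + 1)).flatMap
    (fun i => (PySem.List.pyRange (i + 1) (n + 1)).map (fun j => (i, j)))

-- the effect of one pair on the slice of A's state seen by router r: (its cfg dict, its counter, subnet)
def stepF (r : Int) (st : PySem.Dict String String × Int × Int) (p : Int × Int) :
    PySem.Dict String String × Int × Int :=
  if p.1 = r then
    (st.1.insert ("Gi0/" ++ PySem.Int.toStr st.2.1) ("10.0." ++ PySem.Int.toStr st.2.2 ++ ".1/30"),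
     st.2.1 + 1, st.2.2 + 1)
  else if p.2 = r then
    (st.1.insert ("Gi0/" ++ PySem.Int.toStr st.2.1) ("10.0." ++ PySem.Int.toStr st.2.2 ++ ".2/30"),
     st.2.1 + 1, st.2.2 + 1)
  else (st.1, st.2.1, st.2.2 + 1)

theorem meshFold_flat (n : Int) (xs : List Int)
    (st : PySem.Dict String (PySem.Dict String String) × PySem.Dict String Int × Int) :
    xs.foldl (fun st i => (PySem.List.pyRange (i + 1) (n + 1)).foldl
        (fun st j => meshStepA st i j) st) st
      = (xs.flatMap (fun i => (PySem.List.pyRange (i + 1) (n + 1)).map (fun j => (i, j)))).foldl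
          (fun st p => meshStepA st p.1 p.2) st := by
  induction xs generalizing st with
  | nil => rfl
  | cons a t ih =>
    simp only [List.foldl_cons, List.flatMap_cons, List.foldl_append, List.foldl_map]
    rw [ih]


theorem meshStepA_proj
    (ips : PySem.Dict String (PySem.Dict String String)) (ctr : PySem.Dict String Int)
    (sub : Int) (i j r : Int) (hr : 1 ≤ r) (hi : 1 ≤ i) (hij : i < j) :
    ((meshStepA (ips, ctr, sub) i j).1.getD (mKey r) PySem.Dict.empty,
     (meshStepA (ips, ctr, sub) i j).2.1.getD (mKey r) 0,
     (meshStepA (ips, ctr, sub) i j).2.2)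
      = stepF r (ips.getD (mKey r) PySem.Dict.empty, ctr.getD (mKey r) 0, sub) (i, j) := by
  unfold meshStepA stepF
  rw [show ("R" ++ PySem.Int.toStr i : String) = mKey i from rfl,
      show ("R" ++ PySem.Int.toStr j : String) = mKey j from rfl]
  by_cases hri : r = i
  · have h2 : mKey r ≠ mKey j := mKey_ne (by omega) (by omega) (by omega)
    subst hri
    simp [PySem.Dict.getD_modify, PySem.Dict.getD_insert, h2, h2.symm]
  · by_cases hrj : r = j
    · have h1 : mKey r ≠ mKey i := mKey_ne (by omega) (by omega) (by omega)
      subst hrj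
      simp [PySem.Dict.getD_modify, PySem.Dict.getD_insert, h1, if_neg (by omega : ¬ i = r)]
    · have h1 : mKey r ≠ mKey i := mKey_ne (by omega) (by omega) (by omega)
      have h2 : mKey r ≠ mKey j := mKey_ne (by omega) (by omega) (by omega)
      simp [PySem.Dict.getD_modify, PySem.Dict.getD_insert, h1, h2,
        if_neg (by omega : ¬ i = r), if_neg (by omega : ¬ j = r)]


theorem foldA_proj (r : Int) (hr : 1 ≤ r) :
    ∀ (L : List (Int × Int)), (∀ p ∈ L, 1 ≤ p.1 ∧ p.1 < p.2) →
    ∀ (ips : PySem.Dict String (PySem.Dict String String)) (ctr : PySem.Dict String Int) (sub : Int),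
    ((L.foldl (fun st p => meshStepA st p.1 p.2) (ips, ctr, sub)).1.getD (mKey r) PySem.Dict.empty,
     (L.foldl (fun st p => meshStepA st p.1 p.2) (ips, ctr, sub)).2.1.getD (mKey r) 0,
     (L.foldl (fun st p => meshStepA st p.1 p.2) (ips, ctr, sub)).2.2)
      = L.foldl (stepF r) (ips.getD (mKey r) PySem.Dict.empty, ctr.getD (mKey r) 0, sub) := by
  intro L
  induction L with
  | nil => intro _ ips ctr sub; rfl
  | cons p t ih =>
    intro hmem ips ctr sub
    obtain ⟨hp1, hp2⟩ := hmem p (List.mem_cons_self ..)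
    have hproj := meshStepA_proj ips ctr sub p.1 p.2 r hr hp1 hp2
    simp only [List.foldl_cons]
    have hst : meshStepA (ips, ctr, sub) p.1 p.2
        = ((meshStepA (ips, ctr, sub) p.1 p.2).1,
           (meshStepA (ips, ctr, sub) p.1 p.2).2.1,
           (meshStepA (ips, ctr, sub) p.1 p.2).2.2) := rfl
    rw [hst, ih (fun q hq => hmem q (List.mem_cons_of_mem _ hq))]
    rw [show stepF r (ips.getD (mKey r) PySem.Dict.empty, ctr.getD (mKey r) 0, sub) p
        = ((meshStepA (ips, ctr, sub) p.1 p.2).1.getD (mKey r) PySem.Dict.empty,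
           (meshStepA (ips, ctr, sub) p.1 p.2).2.1.getD (mKey r) 0,
           (meshStepA (ips, ctr, sub) p.1 p.2).2.2) from by rw [hproj]]


theorem foldA_keys :
    ∀ (L : List (Int × Int)) (ips : PySem.Dict String (PySem.Dict String String))
      (ctr : PySem.Dict String Int) (sub : Int),
    (∀ p ∈ L, mKey p.1 ∈ ips.keys ∧ mKey p.2 ∈ ips.keys) →
    (L.foldl (fun st p => meshStepA st p.1 p.2) (ips, ctr, sub)).1.keys = ips.keys := by
  intro L
  induction L with
  | nil => intro ips ctr sub _; rfl
  | cons p t ih =>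
    intro ips ctr sub hmem
    obtain ⟨h1, h2⟩ := hmem p (List.mem_cons_self ..)
    simp only [List.foldl_cons]
    have hst : meshStepA (ips, ctr, sub) p.1 p.2
        = ((meshStepA (ips, ctr, sub) p.1 p.2).1,
           (meshStepA (ips, ctr, sub) p.1 p.2).2.1,
           (meshStepA (ips, ctr, sub) p.1 p.2).2.2) := rfl
    have c1 : ips.contains (mKey p.1) = true := (PySem.Dict.contains_iff_mem_keys _ _).mpr h1
    have k1 : (ips.modify (mKey p.1) PySem.Dict.empty
        (fun d => d.insert ("Gi0/" ++ PySem.Int.toStr (ctr.getD (mKey p.1) 0))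
          ("10.0." ++ PySem.Int.toStr sub ++ ".1/30"))).keys = ips.keys := by
      rw [PySem.Dict.keys_modify, PySem.Dict.keys_insert_of_contains _ _ c1]
    have hkeys : (meshStepA (ips, ctr, sub) p.1 p.2).1.keys = ips.keys := by
      unfold meshStepA
      rw [show ("R" ++ PySem.Int.toStr p.1 : String) = mKey p.1 from rfl,
          show ("R" ++ PySem.Int.toStr p.2 : String) = mKey p.2 from rfl]
      simp only []
      rw [PySem.Dict.keys_modify, PySem.Dict.keys_insert_of_contains, k1]
      rw [PySem.Dict.contains_iff_mem_keys, k1]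
      exact h2
    rw [hst, ih _ _ _ (fun q hq => by
      have := hmem q (List.mem_cons_of_mem _ hq)
      rw [hkeys]; exact this)]
    exact hkeys


-- a run of pairs none of which involves r leaves the slice state alone except subnet
theorem stepF_none (r : Int) :
    ∀ (L : List (Int × Int)), (∀ p ∈ L, p.1 ≠ r ∧ p.2 ≠ r) →
    ∀ d c s, L.foldl (stepF r) (d, c, s) = (d, c, s + L.length) := by
  intro L
  induction L with
  | nil => intro _ d c s; simp
  | cons p t ih =>
    intro hmem d c s
    obtain ⟨h1, h2⟩ := hmem p (List.mem_cons_self ..)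
    simp only [List.foldl_cons, stepF, if_neg h1, if_neg h2]
    rw [ih (fun q hq => hmem q (List.mem_cons_of_mem _ hq))]
    simp only [List.length_cons]
    congr 2
    push_cast
    ring

-- one block of A's inner loop for i < r contributes exactly one ".2" entry to router r
theorem stepF_blockI (n r i : Int) (hi : 1 ≤ i) (hir : i < r) (hrn : r ≤ n) :
    ∀ (d : PySem.Dict String String) (c s : Int),
    ((PySem.List.pyRange (i + 1) (n + 1)).map (fun j => (i, j))).foldl (stepF r) (d, c, s)
      = (d.insert ("Gi0/" ++ PySem.Int.toStr c)
          ("10.0." ++ PySem.Int.toStr (s + (r - i - 1)) ++ ".2/30"), c + 1, s + (n - i)) := by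
  intro d c s
  rw [PySem.List.pyRange_one_append (i+1) r (n+1) (by omega) (by omega),
      PySem.List.pyRange_one_cons (by omega : r < n + 1)]
  rw [List.map_append, List.map_cons, List.foldl_append, List.foldl_cons]
  rw [stepF_none r ((PySem.List.pyRange (i+1) r).map (fun j => (i, j))) (by
    intro p hp
    obtain ⟨j, hj, rfl⟩ := List.mem_map.mp hp
    have := PySem.List.mem_pyRange_one.mp hj
    constructor <;> simp <;> omega)]
  rw [stepF_none r ((PySem.List.pyRange (r+1) (n+1)).map (fun j => (i, j))) (by
    intro p hp
    obtain ⟨j, hj, rfl⟩ := List.mem_map.mp hp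
    have := PySem.List.mem_pyRange_one.mp hj
    constructor <;> simp <;> omega)]
  have hstep : ∀ (st : PySem.Dict String String × Int × Int),
      stepF r st (i, r) = (st.1.insert ("Gi0/" ++ PySem.Int.toStr st.2.1)
        ("10.0." ++ PySem.Int.toStr st.2.2 ++ ".2/30"), st.2.1 + 1, st.2.2 + 1) := by
    intro st
    simp only [stepF]
    rw [if_neg (by omega : ¬ ((i, r) : Int × Int).1 = r)]
    simp
  rw [hstep]
  simp only [List.length_map, PySem.List.length_pyRange_one]
  have h1 : s + (((r - (i+1)).toNat : Nat) : Int) = s + (r - i - 1) := by omega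
  rw [h1]
  refine congrArg₂ _ rfl (congrArg₂ _ rfl ?_)
  omega


-- subnet rank arithmetic
theorem meshSubnet_succ_b (n r b : Int) : meshSubnet n r b + 1 = meshSubnet n r (b + 1) := by
  unfold meshSubnet; ring


theorem meshSubnet_shift (n r i : Int) : meshSubnet n i (i + 1) + (r - i - 1) = meshSubnet n i r := by
  unfold meshSubnet; ring


theorem meshSubnet_next_block (n i : Int) :
    meshSubnet n i (i + 1) + (n - i) = meshSubnet n (i + 1) (i + 1 + 1) := by
  unfold meshSubnet
  have h2 : (0:Int) < 2 := by norm_num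
  rw [PySem.Int.floordiv_eq_ediv_of_pos h2, PySem.Int.floordiv_eq_ediv_of_pos h2]
  have he : (i + 1) * (i + 1 - 1) = i * (i - 1) + i * 2 := by ring
  rw [he, Int.add_mul_ediv_right _ _ (by norm_num : (2:Int) ≠ 0)]
  ring


theorem meshSubnet_one_two (n : Int) : meshSubnet n 1 2 = 1 := by
  unfold meshSubnet
  norm_num [PySem.Int.floordiv_eq_ediv_of_pos]


-- the block i = r matches B's second loop
theorem stepF_blockR (n r : Int) (hr : 1 ≤ r) :
    ∀ (m : Nat) (a : Int), r < a → a ≤ n + 1 → (n + 1 - a).toNat = m →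
    ∀ (d : PySem.Dict String String) (c s : Int), s = meshSubnet n r a →
    ((PySem.List.pyRange a (n + 1)).map (fun j => (r, j))).foldl (stepF r) (d, c, s)
      = (((PySem.List.pyRange a (n + 1)).foldl (meshCfgStep2 n r) (d, c)).1,
         ((PySem.List.pyRange a (n + 1)).foldl (meshCfgStep2 n r) (d, c)).2,
         meshSubnet n r (n + 1)) := by
  intro m
  induction m with
  | zero =>
    intro a ha1 ha2 hm d c s hs
    have hae : a = n + 1 := by omega
    subst hae hs
    rw [PySem.List.pyRange_one_eq_nil (by omega)]
    rfl
  | succ m ih =>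
    intro a ha1 ha2 hm d c s hs
    have hlt : a < n + 1 := by omega
    rw [PySem.List.pyRange_one_cons hlt, List.map_cons, List.foldl_cons, List.foldl_cons]
    have hstep : stepF r (d, c, s) (r, a)
        = (d.insert ("Gi0/" ++ PySem.Int.toStr c)
            ("10.0." ++ PySem.Int.toStr s ++ ".1/30"), c + 1, s + 1) := by
      simp [stepF]
    rw [hstep]
    have hs' : s + 1 = meshSubnet n r (a + 1) := by rw [hs, meshSubnet_succ_b]
    rw [ih (a + 1) (by omega) (by omega) (by omega) _ _ _ hs']
    have hcfg : meshCfgStep2 n r (d, c) a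
        = (d.insert ("Gi0/" ++ PySem.Int.toStr c)
            ("10.0." ++ PySem.Int.toStr s ++ ".1/30"), c + 1) := by
      simp only [meshCfgStep2]
      rw [hs]
    rw [hcfg]

-- the blocks i < r match B's first loop
theorem stepF_part1 (n r : Int) (hr : 1 ≤ r) (hrn : r ≤ n) :
    ∀ (m : Nat) (i0 : Int), 1 ≤ i0 → i0 ≤ r → (r - i0).toNat = m →
    ∀ (d : PySem.Dict String String) (c s : Int), s = meshSubnet n i0 (i0 + 1) →
    ((PySem.List.pyRange i0 r).flatMap
        (fun i => (PySem.List.pyRange (i + 1) (n + 1)).map (fun j => (i, j)))).foldl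
      (stepF r) (d, c, s)
      = (((PySem.List.pyRange i0 r).foldl (meshCfgStep1 n r) (d, c)).1,
         ((PySem.List.pyRange i0 r).foldl (meshCfgStep1 n r) (d, c)).2,
         meshSubnet n r (r + 1)) := by
  intro m
  induction m with
  | zero =>
    intro i0 hi1 hi2 hm d c s hs
    have hie : i0 = r := by omega
    subst hie hs
    rw [PySem.List.pyRange_one_eq_nil (by omega)]
    rfl
  | succ m ih =>
    intro i0 hi1 hi2 hm d c s hs
    have hlt : i0 < r := by omega
    rw [PySem.List.pyRange_one_cons hlt, List.flatMap_cons, List.foldl_append, List.foldl_cons]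
    rw [stepF_blockI n r i0 hi1 hlt hrn d c s]
    have hv : s + (r - i0 - 1) = meshSubnet n i0 r := by rw [hs, meshSubnet_shift]
    have hs' : s + (n - i0) = meshSubnet n (i0 + 1) (i0 + 1 + 1) := by
      rw [hs, meshSubnet_next_block]
    rw [hv]
    rw [ih (i0 + 1) (by omega) (by omega) (by omega) _ _ _ hs']
    have hcfg : meshCfgStep1 n r (d, c) i0
        = (d.insert ("Gi0/" ++ PySem.Int.toStr c)
            ("10.0." ++ PySem.Int.toStr (meshSubnet n i0 r) ++ ".2/30"), c + 1) := rfl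
    rw [hcfg]

-- assembling the three parts: router r's slice of A's loop equals B's per-router config
theorem stepF_pairs (n r : Int) (hr : 1 ≤ r) (hrn : r ≤ n) :
    ((meshPairs n).foldl (stepF r) (PySem.Dict.empty, 0, 1)).1 = meshCfg n r := by
  unfold meshPairs
  rw [PySem.List.pyRange_one_append 1 r (n + 1) (by omega) (by omega),
      PySem.List.pyRange_one_cons (by omega : r < n + 1)]
  rw [List.flatMap_append, List.flatMap_cons, List.foldl_append, List.foldl_append]
  rw [stepF_part1 n r hr hrn (r - 1).toNat 1 (by omega) (by omega) (by omega)
      PySem.Dict.empty 0 1 (meshSubnet_one_two n).symm]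
  rw [stepF_blockR n r hr (n - r).toNat (r + 1) (by omega) (by omega) (by omega)
      _ _ _ rfl]
  rw [stepF_none r _ (by
    intro p hp
    obtain ⟨i, hi, hpi⟩ := List.mem_flatMap.mp hp
    obtain ⟨j, hj, rfl⟩ := List.mem_map.mp hpi
    have h1 := PySem.List.mem_pyRange_one.mp hi
    have h2 := PySem.List.mem_pyRange_one.mp hj
    constructor <;> simp <;> omega)]
  rfl


theorem getD_foldl_insert_empty (L : List Int) (k : String)
    (d : PySem.Dict String (PySem.Dict String String))
    (h : d.getD k PySem.Dict.empty = PySem.Dict.empty) :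
    (L.foldl (fun d i => d.insert ("R" ++ PySem.Int.toStr i) PySem.Dict.empty) d).getD k
      PySem.Dict.empty = PySem.Dict.empty := by
  induction L generalizing d with
  | nil => exact h
  | cons a t ih =>
    simp only [List.foldl_cons]
    apply ih
    rw [PySem.Dict.getD_insert]
    split <;> simp [h]

theorem getD_foldl_insert_zero (L : List Int) (k : String) (d : PySem.Dict String Int)
    (h : d.getD k 0 = 0) :
    (L.foldl (fun d i => d.insert ("R" ++ PySem.Int.toStr i) 0) d).getD k 0 = 0 := by
  induction L generalizing d with
  | nil => exact h
  | cons a t ih =>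
    simp only [List.foldl_cons]
    apply ih
    rw [PySem.Dict.getD_insert]
    split <;> simp [h]

theorem mesh_rng_nodup (n : Int) : ((PySem.List.pyRange 1 (n + 1)).map mKey).Nodup := by
  apply List.Nodup.map_on
  · intro x hx y hy hxy
    have hx1 : 1 ≤ x := ((PySem.List.mem_pyRange_one).mp hx).1
    have hy1 : 1 ≤ y := ((PySem.List.mem_pyRange_one).mp hy).1
    by_contra hne
    exact mKey_ne (by omega) (by omega) hne hxy
  · rw [PySem.List.pyRange_one]
    apply List.Nodup.map
    · intro a b hab
      have hab' : (1 : Int) + (a : Int) = 1 + (b : Int) := hab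
      have : (a : Int) = b := by omega
      exact_mod_cast this
    · exact List.nodup_range

-- ===== VERDICT (by name: the statement is the Claim_ definition above) =====
theorem generate_mesh_ips_spec : Claim_equal_generate_mesh_ips := by
  intro n _
  unfold Spec_generate_mesh_ips generate_mesh_ips generate_mesh_ips_alt
  simp only []
  set rng := PySem.List.pyRange 1 (n + 1) with hrng
  set ips0 := rng.foldl (fun d i => d.insert ("R" ++ PySem.Int.toStr i) PySem.Dict.empty)
      (PySem.Dict.empty : PySem.Dict String (PySem.Dict String String)) with hips0
  set ctr0 := rng.foldl (fun d i => d.insert ("R" ++ PySem.Int.toStr i) 0)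
      (PySem.Dict.empty : PySem.Dict String Int) with hctr0
  rw [meshFold_flat]
  set L := rng.flatMap (fun i => (PySem.List.pyRange (i + 1) (n + 1)).map (fun j => (i, j)))
    with hL
  have hLpairs : ∀ p ∈ L, 1 ≤ p.1 ∧ p.1 < p.2 := by
    intro p hp
    obtain ⟨i, hi, hpi⟩ := List.mem_flatMap.mp hp
    obtain ⟨j, hj, rfl⟩ := List.mem_map.mp hpi
    have h1 := PySem.List.mem_pyRange_one.mp hi
    have h2 := PySem.List.mem_pyRange_one.mp hj
    simp <;> omega
  -- initial dict contents
  have hbitems := PySem.Dict.items_foldl_insert_fresh rng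
      (fun r => "R" ++ PySem.Int.toStr r) (fun r => meshCfg n r) PySem.Dict.empty
      (by intro a _; simp) (mesh_rng_nodup n)
  have haitems := PySem.Dict.items_foldl_insert_fresh rng
      (fun i => "R" ++ PySem.Int.toStr i)
      (fun _ => (PySem.Dict.empty : PySem.Dict String String)) PySem.Dict.empty
      (by intro a _; simp) (mesh_rng_nodup n)
  have hkeys0 : ips0.keys = rng.map mKey := by
    rw [hips0]
    simp only [PySem.Dict.keys]
    rw [show (rng.foldl (fun d i => d.insert ("R" ++ PySem.Int.toStr i) PySem.Dict.empty)
        (PySem.Dict.empty : PySem.Dict String (PySem.Dict String String))).items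
      = PySem.Dict.empty.items ++ rng.map (fun i => ("R" ++ PySem.Int.toStr i, PySem.Dict.empty))
      from haitems]
    simp [mKey, List.map_map, Function.comp,
      show (PySem.Dict.empty : PySem.Dict String (PySem.Dict String String)).items = [] from rfl]
  -- keys after the loop
  have hkeysA := foldA_keys L ips0 ctr0 1 (by
    intro p hp
    have h := hLpairs p hp
    obtain ⟨i, hi, hpi⟩ := List.mem_flatMap.mp hp
    obtain ⟨j, hj, rfl⟩ := List.mem_map.mp hpi
    have h1 := PySem.List.mem_pyRange_one.mp hi
    have h2 := PySem.List.mem_pyRange_one.mp hj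
    rw [hkeys0]
    constructor <;> exact List.mem_map_of_mem (by rw [hrng, PySem.List.mem_pyRange_one]; simp <;> omega))
  have hnodupA : (L.foldl (fun st p => meshStepA st p.1 p.2) (ips0, ctr0, 1)).1.keys.Nodup := by
    rw [hkeysA, hkeys0]; exact mesh_rng_nodup n
  rw [PySem.Dict.items_eq_map_keys _ hnodupA PySem.Dict.empty, hkeysA, hkeys0]
  rw [show (rng.foldl (fun d r => d.insert ("R" ++ PySem.Int.toStr r) (meshCfg n r))
      PySem.Dict.empty).items = PySem.Dict.empty.items
        ++ rng.map (fun r => ("R" ++ PySem.Int.toStr r, meshCfg n r)) from hbitems]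
  rw [show (PySem.Dict.empty : PySem.Dict String (PySem.Dict String String)).items = [] from rfl]
  simp only [List.nil_append, List.map_map]
  apply List.map_congr_left
  intro r hrm
  have hr := PySem.List.mem_pyRange_one.mp (by rw [hrng] at hrm; exact hrm)
  simp only [Function.comp]
  refine congrArg₂ _ rfl ?_
  -- router r's final dict equals meshCfg n r
  have hproj := foldA_proj r (by omega) L hLpairs ips0 ctr0 1
  have hgA : ips0.getD (mKey r) PySem.Dict.empty = PySem.Dict.empty := by
    rw [hips0]; exact getD_foldl_insert_empty rng _ _ (by simp)
  have hgC : ctr0.getD (mKey r) 0 = 0 := by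
    rw [hctr0]; exact getD_foldl_insert_zero rng _ _ (by simp)
  have h1 : (L.foldl (fun st p => meshStepA st p.1 p.2) (ips0, ctr0, 1)).1.getD (mKey r)
      PySem.Dict.empty = (L.foldl (stepF r) (PySem.Dict.empty, 0, 1)).1 := by
    have h := congrArg Prod.fst hproj
    rw [hgA, hgC] at h
    exact h
  have h2 : (L.foldl (stepF r) (PySem.Dict.empty, 0, 1)).1 = meshCfg n r := by
    rw [show L = meshPairs n from by rw [hL, hrng]; rfl]
    exact stepF_pairs n r (by omega) (by omega)
  rw [h1, h2]
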